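-- pv_equiv track=rewrite | github.com/mearramos/EP2-2025.1 | funcoes.py | calcula_pontos_quadra
-- ===== SOURCE A (Python) =====
-- def calcula_pontos_quadra(lista):
--     pontuacao = 0
--     quantidade = len(lista)
--
--     dicio = {}
--     i = 0
--
--     while i < quantidade:
--         if lista[i] not in dicio:
--             dicio[lista[i]] = 1
--         else:
--             dicio[lista[i]] += 1
--
--         pontuacao += lista[i]
--         i += 1
--
--     for repeticao in dicio.values():
--         if repeticao >= 4:
--             return pontuacao
--
--     return 0
-- ===== SOURCE B (Python) =====
-- def calcula_pontos_quadra(lista):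
--     s = sorted(lista)
--     for i in range(len(s) - 3):
--         if s[i] == s[i + 3]:
--             return sum(lista)
--     return 0
-- ===== Notes on version B (the rewrite author's own statement) =====
-- stated objective: simpler
-- what changed: Replaces the frequency-dictionary pass plus values scan by sorting a copy and checking whether any element equals the one three positions later (a value repeats >=4 times iff the sorted copy has s[i] == s[i+3]).
import Mathlib
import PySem

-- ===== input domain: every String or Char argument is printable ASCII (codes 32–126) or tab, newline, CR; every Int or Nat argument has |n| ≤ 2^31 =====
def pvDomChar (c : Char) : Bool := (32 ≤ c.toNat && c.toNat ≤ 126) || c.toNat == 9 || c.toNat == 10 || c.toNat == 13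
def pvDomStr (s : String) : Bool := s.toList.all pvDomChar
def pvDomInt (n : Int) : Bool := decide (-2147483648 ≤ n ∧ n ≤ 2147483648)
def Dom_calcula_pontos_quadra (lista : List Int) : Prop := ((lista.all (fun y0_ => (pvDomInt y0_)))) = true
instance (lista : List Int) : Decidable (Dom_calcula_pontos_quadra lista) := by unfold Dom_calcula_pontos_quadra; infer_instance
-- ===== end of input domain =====

-- B replaces A's frequency-dictionary pass plus values scan by sorting a copy and
-- checking whether some s[i] equals s[i+3] (objective: simpler; no speed claim).

-- ===== PORT A =====
-- loop body: 'if lista[i] not in dicio: dicio[lista[i]] = 1 else: dicio[lista[i]] += 1; pontuacao += lista[i]'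
def aStep (st : PySem.Dict Int Int × Int) (x : Int) : PySem.Dict Int Int × Int :=
  (if st.1.contains x = false then st.1.insert x 1 else st.1.insert x (st.1.getD x 0 + 1),
   st.2 + x)

-- 'for repeticao in dicio.values(): if repeticao >= 4: return pontuacao' then 'return 0'
def aLoopValues (pontuacao : Int) : List Int → Int
  | [] => 0
  | repeticao :: rest => if 4 ≤ repeticao then pontuacao else aLoopValues pontuacao rest

def calcula_pontos_quadra (lista : List Int) : Int :=
  let quantidade : Int := PySem.List.len lista
  let st := (PySem.List.pyRange 0 quantidade 1).foldl
    (fun st i => aStep st (PySem.List.pyGetD lista i 0))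
    ((PySem.Dict.empty : PySem.Dict Int Int), (0 : Int))
  aLoopValues st.2 st.1.values

-- ===== PORT B =====
-- 'for i in range(len(s) - 3): if s[i] == s[i + 3]: return sum(lista)' then 'return 0'
def altLoop (s : List Int) (total : Int) : List Int → Int
  | [] => 0
  | i :: rest => if PySem.List.pyGetD s i 0 = PySem.List.pyGetD s (i + 3) 0 then total
                 else altLoop s total rest

def calcula_pontos_quadra_alt (lista : List Int) : Int :=
  let s := PySem.List.sorted lista (fun x => x) false
  altLoop s lista.sum (PySem.List.pyRange 0 (PySem.List.len s - 3) 1)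

-- ===== PRECONDITION & SPEC =====
def Spec_calcula_pontos_quadra (lista : List Int) (out : Int) : Prop := out = calcula_pontos_quadra_alt lista
instance (lista : List Int) (out : Int) : Decidable (Spec_calcula_pontos_quadra lista out) := by unfold Spec_calcula_pontos_quadra; infer_instance

-- ===== CLAIM (what is proved, stated in full; the proofs are below) =====
def Claim_equal_calcula_pontos_quadra : Prop := ∀ (lista : List Int), Dom_calcula_pontos_quadra lista → Spec_calcula_pontos_quadra lista (calcula_pontos_quadra lista)

-- ===== LEMMAS AND PROOFS =====

-- A's values loop with early return is 'if any value ≥ 4 then pontuacao else 0'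
theorem aLoopValues_eq (p : Int) (vs : List Int) :
    aLoopValues p vs = if vs.any (fun r => decide (4 ≤ r)) then p else 0 := by
  induction vs with
  | nil => simp [aLoopValues]
  | cons v rest ih =>
      simp only [aLoopValues, List.any_cons]
      by_cases h : 4 ≤ v <;> simp [h, ih]

-- B's index loop with early return is 'if any s[i] = s[i+3] then total else 0'
theorem altLoop_eq (s : List Int) (t : Int) (idxs : List Int) :
    altLoop s t idxs =
      if idxs.any (fun i => decide (PySem.List.pyGetD s i 0 = PySem.List.pyGetD s (i + 3) 0))
      then t else 0 := by
  induction idxs with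
  | nil => simp [altLoop]
  | cons i rest ih =>
      simp only [altLoop, List.any_cons]
      by_cases h : PySem.List.pyGetD s i 0 = PySem.List.pyGetD s (i + 3) 0 <;> simp [h, ih]

-- the dict-building step of A, alone
def dStep (d : PySem.Dict Int Int) (x : Int) : PySem.Dict Int Int :=
  if d.contains x = false then d.insert x 1 else d.insert x (d.getD x 0 + 1)

-- A's combined loop splits into the dict loop and the running sum
theorem foldl_aStep (l : List Int) (d0 : PySem.Dict Int Int) (p0 : Int) :
    l.foldl aStep (d0, p0) = (l.foldl dStep d0, p0 + l.sum) := by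
  induction l generalizing d0 p0 with
  | nil => simp
  | cons a t ih =>
      simp only [List.foldl_cons, List.sum_cons, aStep, dStep, ih]
      rw [add_assoc]

-- A's branchy dict step is Counter's step
theorem dStep_eq : dStep = fun (d : PySem.Dict Int Int) (x : Int) => d.insert x (d.getD x 0 + 1) := by
  funext d x
  unfold dStep
  by_cases h : d.contains x
  · simp [h]
  · have hc : d.contains x = false := by revert h; cases d.contains x <;> simp
    rw [if_pos (by rw [hc])]
    have h0 : d.getD x 0 = 0 := PySem.Dict.getD_of_not_contains d 0 hc
    rw [h0, zero_add]

-- the values of Counter(lista) are the per-distinct-element counts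
theorem values_counter (lista : List Int) :
    (PySem.Dict.counter lista).values
      = (PySem.Set.ofList lista).map (fun k => ((lista.count k : Int))) := by
  simp only [PySem.Dict.values, PySem.Dict.items_counter, List.map_map]
  rfl

-- core: a sorted list has s[k] = s[k+3] for some k iff some element occurs ≥ 4 times
theorem quad_iff (s : List Int) (hs : s.Pairwise (· ≤ ·)) :
    (∃ k : Nat, k + 3 < s.length ∧ s[k]?.getD 0 = s[k + 3]?.getD 0)
    ↔ (∃ x ∈ s, 4 ≤ s.count x) := by
  have mono : ∀ (p q : Nat) (hpq : p ≤ q) (hq : q < s.length),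
      s[p]'(Nat.lt_of_le_of_lt hpq hq) ≤ s[q]'hq := by
    intro p q hpq hq
    rcases Nat.eq_or_lt_of_le hpq with h | h
    · subst h; exact le_refl _
    · exact (List.pairwise_iff_getElem.mp hs) p q (Nat.lt_of_le_of_lt hpq hq) hq h
  constructor
  · rintro ⟨k, hk, heq⟩
    have hk0 : k < s.length := by omega
    rw [List.getElem?_eq_getElem hk0, List.getElem?_eq_getElem hk] at heq
    simp only [Option.getD_some] at heq
    have e1 : s[k+1]'(by omega) = s[k] := by
      have h1 := mono (k+1) (k+3) (by omega) hk
      have h2 := mono k (k+1) (by omega) (by omega)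
      omega
    have e2 : s[k+2]'(by omega) = s[k] := by
      have h1 := mono (k+2) (k+3) (by omega) hk
      have h2 := mono k (k+2) (by omega) (by omega)
      omega
    have hdrop : s.drop k = s[k] :: s[k] :: s[k] :: s[k] :: s.drop (k+4) := by
      rw [List.drop_eq_getElem_cons hk0,
          List.drop_eq_getElem_cons (show k+1 < s.length by omega),
          List.drop_eq_getElem_cons (show k+2 < s.length by omega),
          List.drop_eq_getElem_cons (show k+3 < s.length by omega), e1, e2, ← heq]
    refine ⟨s[k], List.getElem_mem hk0, ?_⟩
    generalize hx : s[k] = x at hdrop ⊢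
    have h1 : s.count x = (s.take k).count x + (s.drop k).count x := by
      conv_lhs => rw [← List.take_append_drop k s, List.count_append]
    have h2 : 4 ≤ (s.drop k).count x := by
      rw [hdrop]
      simp only [List.count_cons_self]
      omega
    omega
  · rintro ⟨x, hmem, hcnt⟩
    have hi : s.idxOf x < s.length := List.idxOf_lt_length_of_mem hmem
    have hix : s[s.idxOf x] = x := List.getElem_idxOf hi
    set i := s.idxOf x with hidef
    have hsplit : s.count x = (s.take i).count x + (s.drop i).count x := by
      conv_lhs => rw [← List.take_append_drop i s, List.count_append]
    have htake0 : (s.take i).count x = 0 := by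
      rw [List.count_eq_zero]
      intro hmt
      have := (List.mem_take_iff_idxOf_lt hmem).mp hmt
      omega
    have hdropcnt : 4 ≤ (s.drop i).count x := by omega
    have hcl : (s.drop i).count x ≤ (s.drop i).length := List.count_le_length
    rw [List.length_drop] at hcl
    have hlen : i + 4 ≤ s.length := by omega
    have hsplit2 : (s.drop i).count x
        = ((s.drop i).take 3).count x + ((s.drop i).drop 3).count x := by
      conv_lhs => rw [← List.take_append_drop 3 (s.drop i), List.count_append]
    have htk3 : ((s.drop i).take 3).count x ≤ 3 := by
      have h1 : ((s.drop i).take 3).count x ≤ ((s.drop i).take 3).length :=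
        List.count_le_length
      have h2 : ((s.drop i).take 3).length ≤ 3 := by simp
      omega
    have hxdrop : x ∈ (s.drop i).drop 3 := List.count_pos_iff.mp (by omega)
    rw [List.drop_drop] at hxdrop
    obtain ⟨j, hj, hjx⟩ := List.mem_iff_getElem.mp hxdrop
    have hjlen : i + 3 + j < s.length := by
      simp only [List.length_drop] at hj
      omega
    rw [List.getElem_drop] at hjx
    have h5 := mono (i+3) (i+3+j) (by omega) hjlen
    have hlb := mono i (i+3) (by omega) (show i+3 < s.length by omega)
    refine ⟨i, by omega, ?_⟩
    rw [List.getElem?_eq_getElem (show i < s.length by omega),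
        List.getElem?_eq_getElem (show i+3 < s.length by omega)]
    simp only [Option.getD_some]
    rw [hjx] at h5
    rw [hix] at hlb ⊢
    exact le_antisymm hlb h5

-- ===== VERDICT (by name: the statement is the Claim_ definition above) =====
theorem calcula_pontos_quadra_spec : Claim_equal_calcula_pontos_quadra := by
  intro lista _
  show calcula_pontos_quadra lista = calcula_pontos_quadra_alt lista
  unfold calcula_pontos_quadra calcula_pontos_quadra_alt
  simp only []
  rw [PySem.List.foldl_pyRange_zero_pyGetD lista 0 aStep ((PySem.Dict.empty : PySem.Dict Int Int), (0 : Int))]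
  rw [foldl_aStep, dStep_eq, PySem.Dict.foldl_insert_getD_add_one_eq_counter]
  rw [aLoopValues_eq, altLoop_eq, values_counter, zero_add]
  have hperm : (PySem.List.sorted lista (fun x => x) false).Perm lista :=
    PySem.List.sorted_perm lista (fun x => x) false
  have hA : ((PySem.Set.ofList lista).map (fun k => ((lista.count k : Int)))).any
        (fun r => decide (4 ≤ r)) = true
      ↔ ∃ x ∈ lista, 4 ≤ lista.count x := by
    simp only [List.any_map, List.any_eq_true, Function.comp, decide_eq_true_eq,
      PySem.Set.mem_ofList]
    constructor
    · rintro ⟨x, hx, h⟩; exact ⟨x, hx, by exact_mod_cast h⟩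
    · rintro ⟨x, hx, h⟩; exact ⟨x, hx, by exact_mod_cast h⟩
  have hB : ((PySem.List.pyRange 0 (PySem.List.len (PySem.List.sorted lista (fun x => x) false) - 3) 1).any
        (fun i => decide (PySem.List.pyGetD (PySem.List.sorted lista (fun x => x) false) i 0
          = PySem.List.pyGetD (PySem.List.sorted lista (fun x => x) false) (i + 3) 0))) = true
      ↔ ∃ x ∈ lista, 4 ≤ lista.count x := by
    set s := PySem.List.sorted lista (fun x => x) false with hsdef
    have hmid : (∃ k : Nat, k + 3 < s.length ∧ s[k]?.getD 0 = s[k + 3]?.getD 0)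
        ↔ ∃ x ∈ lista, 4 ≤ lista.count x := by
      rw [quad_iff s (by simpa using PySem.List.sorted_pairwise (xs := lista) (key := fun x => x))]
      constructor
      · rintro ⟨x, hx, h⟩; exact ⟨x, hperm.mem_iff.mp hx, by rw [← hperm.count_eq]; exact h⟩
      · rintro ⟨x, hx, h⟩; exact ⟨x, hperm.mem_iff.mpr hx, by rw [hperm.count_eq]; exact h⟩
    rw [← hmid]
    simp only [List.any_eq_true, PySem.List.mem_pyRange_one, decide_eq_true_eq, PySem.List.len_eq]
    constructor
    · rintro ⟨i, ⟨h0, hlt⟩, heq⟩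
      refine ⟨i.toNat, by omega, ?_⟩
      rw [show i = ((i.toNat : Nat) : Int) by omega] at heq
      rw [show ((i.toNat : Nat) : Int) + 3 = ((i.toNat + 3 : Nat) : Int) by push_cast; ring] at heq
      rw [PySem.List.pyGetD_natCast, PySem.List.pyGetD_natCast,
        List.getD_eq_getElem?_getD, List.getD_eq_getElem?_getD] at heq
      exact heq
    · rintro ⟨k, hk, heq⟩
      refine ⟨(k : Int), ⟨by omega, by omega⟩, ?_⟩
      rw [show ((k : Nat) : Int) + 3 = ((k + 3 : Nat) : Int) by push_cast; ring]
      rw [PySem.List.pyGetD_natCast, PySem.List.pyGetD_natCast,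
        List.getD_eq_getElem?_getD, List.getD_eq_getElem?_getD]
      exact heq
  have hc : ((PySem.Set.ofList lista).map (fun k => ((lista.count k : Int)))).any
        (fun r => decide (4 ≤ r))
      = ((PySem.List.pyRange 0 (PySem.List.len (PySem.List.sorted lista (fun x => x) false) - 3) 1).any
        (fun i => decide (PySem.List.pyGetD (PySem.List.sorted lista (fun x => x) false) i 0
          = PySem.List.pyGetD (PySem.List.sorted lista (fun x => x) false) (i + 3) 0))) := by
    by_cases h : ∃ x ∈ lista, 4 ≤ lista.count x
    · rw [hA.mpr h, hB.mpr h]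
    · rw [Bool.eq_false_iff.mpr (fun hh => h (hA.mp hh)),
          Bool.eq_false_iff.mpr (fun hh => h (hB.mp hh))]
  rw [hc]
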